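-- pv_equiv track=rewrite | github.com/Torfab/adventOfCodeAndOtherEvents | adventOfCode/2020/day6.py | checkValidB
-- ===== SOURCE A (Python) =====
-- def checkValidB(form):
--   current=[]
--   for element in form[0]:
--     current.append(element)
--   for singleForm in form[1:]:
--     tentative=[]
--     for element in singleForm:
--       if(element in current):
--         tentative.append(element)
--     current=tentative
--   return len(current)
-- ===== SOURCE B (Python) =====
-- def checkValidB(form):
--   n = len(form)
--   presence = {}
--   for f in form:
--     for c in set(f):
--       presence[c] = presence.get(c, 0) + 1
--   return sum(1 for c in form[-1] if presence.get(c, 0) == n)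
-- ===== Notes on version B (the rewrite author's own statement) =====
-- stated objective: alternative
-- what changed: B never intersects anything: it builds one presence counter mapping each character to the number of forms it occurs in, then counts the last form's characters (with multiplicity) whose presence equals the number of forms, instead of threading a filtered character list through every form.
import Mathlib
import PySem

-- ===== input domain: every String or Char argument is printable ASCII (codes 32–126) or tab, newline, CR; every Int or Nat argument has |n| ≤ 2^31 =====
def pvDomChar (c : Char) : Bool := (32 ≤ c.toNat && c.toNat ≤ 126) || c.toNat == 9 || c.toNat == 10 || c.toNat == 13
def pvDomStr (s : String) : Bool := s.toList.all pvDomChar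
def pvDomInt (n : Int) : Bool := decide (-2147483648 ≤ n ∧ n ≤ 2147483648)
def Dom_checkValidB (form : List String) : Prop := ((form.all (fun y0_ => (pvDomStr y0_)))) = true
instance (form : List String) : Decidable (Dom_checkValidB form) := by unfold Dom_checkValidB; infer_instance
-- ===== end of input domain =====

-- B builds a presence counter (per character, the number of forms containing it) and counts the
-- last form's characters whose presence equals the number of forms — no intersection at all (objective: alternative).


-- ===== PORT A =====
-- literal port of A: current = chars of form[0] appended one by one; for each later form,
-- keep (with multiplicity) its characters that are members of current; return len(current)
def checkValidB (form : List String) : Int :=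
  let current : List Char :=
    (form.headD "").toList.foldl (fun acc e => acc ++ [e]) []
  let current : List Char :=
    (form.drop 1).foldl
      (fun cur singleForm =>
        singleForm.toList.foldl
          (fun tentative e => if cur.contains e then tentative ++ [e] else tentative)
          [])
      current
  Int.ofNat current.length

-- ===== PORT B =====
-- literal port of B: presence[c] = number of forms whose character set contains c;
-- then count the characters of the last form whose presence equals len(form)
def checkValidB_alt (form : List String) : Int :=
  let n : Int := form.length
  let presence : PySem.Dict Char Int :=
    form.foldl
      (fun d f =>
        (PySem.Set.ofList f.toList).foldl (fun d c => d.insert c (d.getD c 0 + 1)) d)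
      PySem.Dict.empty
  (form.getLast?.getD "").toList.foldl
    (fun t c => if presence.getD c 0 == n then t + 1 else t) 0

-- ===== PRECONDITION & SPEC =====
-- A raises IndexError on the empty list (form[0]); B's form[-1] raises there too.
def Pre_checkValidB (form : List String) : Prop := form ≠ []
instance (form : List String) : Decidable (Pre_checkValidB form) := by unfold Pre_checkValidB; infer_instance
def pvWitness_checkValidB : List String := ["abc", "bcd"]

def Spec_checkValidB (form : List String) (out : Int) : Prop := out = checkValidB_alt form
instance (form : List String) (out : Int) : Decidable (Spec_checkValidB form out) := by unfold Spec_checkValidB; infer_instance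

-- ===== CLAIM (what is proved, stated in full; the proofs are below) =====
def Claim_equal_checkValidB : Prop := ∀ (form : List String), Dom_checkValidB form → Pre_checkValidB form → Spec_checkValidB form (checkValidB form)

-- ===== LEMMAS AND PROOFS =====

-- A's filtering step over one form
def pvStep (cur : List Char) (sf : String) : List Char :=
  sf.toList.filter (cur.contains ·)

-- the append-one-by-one loop is just an append
theorem pvFoldAppend (l : List Char) (t : List Char) :
    l.foldl (fun acc e => acc ++ [e]) t = t ++ l := by
  induction l generalizing t with
  | nil => simp
  | cons x xs ih => simp [List.foldl, ih]

-- A's inner loop is a filter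
theorem pvInnerA (l : List Char) (cur t : List Char) :
    l.foldl (fun tentative e => if cur.contains e then tentative ++ [e] else tentative) t
      = t ++ l.filter (cur.contains ·) := by
  induction l generalizing t with
  | nil => simp
  | cons x xs ih =>
    rw [List.foldl_cons, ih]
    by_cases h : x ∈ cur <;> simp [h]

-- characterisation of A's outer loop: for a nonempty list of forms, the final length is the
-- number of characters of the LAST form (with multiplicity) lying in cur and in every earlier form
theorem pvGoEq (fs : List String) (hfs : fs ≠ []) (cur : List Char) :
    (fs.foldl pvStep cur).length
      = (fs.getLastD "").toList.countP
          (fun c => cur.contains c && decide (∀ g ∈ fs.dropLast, c ∈ g.toList)) := by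
  induction fs generalizing cur with
  | nil => exact absurd rfl hfs
  | cons f fs' ih =>
    cases fs' with
    | nil =>
      simp [pvStep, List.countP_eq_length_filter]
    | cons f' fs'' =>
      have h2 : (f' :: fs'') ≠ [] := by simp
      have := ih h2 (pvStep cur f)
      simp only [List.foldl_cons] at *
      rw [this]
      apply List.countP_congr
      intro c _
      simp only [pvStep, List.contains_eq_mem, List.mem_filter, List.dropLast_cons_of_ne_nil h2,
        List.mem_cons, decide_eq_true_eq]
      by_cases hcur : c ∈ cur <;> by_cases hf : c ∈ f.toList <;>
        simp [hcur, hf]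

-- B's presence dict: the value at c counts the forms whose character set contains c
theorem pvPresenceGetD (fs : List String) (d : PySem.Dict Char Int) (c : Char) :
    (fs.foldl
        (fun d f =>
          (PySem.Set.ofList f.toList).foldl (fun d c => d.insert c (d.getD c 0 + 1)) d)
        d).getD c 0
      = d.getD c 0 + (fs.countP (fun f => decide (c ∈ f.toList)) : Int) := by
  induction fs generalizing d with
  | nil => simp
  | cons f fs' ih =>
    rw [List.foldl_cons, ih, PySem.Dict.getD_foldl_insert_add_one]
    have hc : (PySem.Set.ofList f.toList).count c = if c ∈ f.toList then 1 else 0 := by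
      by_cases h : c ∈ f.toList
      · rw [if_pos h]
        exact List.count_eq_one_of_mem (PySem.Set.nodup_ofList _) (by simpa using h)
      · rw [if_neg h]
        exact List.count_eq_zero_of_not_mem (by simpa using h)
    rw [hc, List.countP_cons]
    by_cases h : c ∈ f.toList
    · simp [h]; ring
    · simp [h]

-- B's counting loop is a countP
theorem pvFoldCount (l : List Char) (p : Char → Bool) (n : Int) :
    l.foldl (fun t c => if p c then t + 1 else t) n = n + l.countP p := by
  induction l generalizing n with
  | nil => simp
  | cons x xs ih =>
    by_cases h : p x <;> simp [List.foldl, h, ih]; ring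

-- ===== VERDICT (by name: the statement is the Claim_ definition above) =====
theorem checkValidB_spec : Claim_equal_checkValidB := by
  intro form _ hpre
  unfold Spec_checkValidB checkValidB checkValidB_alt
  match form with
  | [] => exact absurd rfl hpre
  | [f0] =>
    simp only [List.headD_cons, List.drop_succ_cons, List.drop_zero, List.foldl_nil,
      pvFoldAppend, List.nil_append, List.getLast?_singleton, Option.getD_some]
    rw [pvFoldCount]
    have hcnt : f0.toList.countP
        (fun c =>
          ((([f0] : List String).foldl
              (fun d f =>
                (PySem.Set.ofList f.toList).foldl (fun d c => d.insert c (d.getD c 0 + 1)) d)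
              PySem.Dict.empty).getD c 0 == (([f0] : List String).length : Int)))
        = f0.toList.length := by
      rw [List.countP_eq_length]
      intro c hc
      rw [pvPresenceGetD]
      simp [hc]
    rw [hcnt]
    simp
  | f0 :: r :: rs =>
    have hne : (r :: rs) ≠ [] := by simp
    simp only [List.headD_cons, List.drop_succ_cons, List.drop_zero, pvFoldAppend,
      List.nil_append]
    have hfun :
        (fun (cur : List Char) (singleForm : String) =>
            singleForm.toList.foldl
              (fun tentative e => if cur.contains e then tentative ++ [e] else tentative) [])
        = pvStep := by
      funext cur sf
      rw [pvInnerA, List.nil_append, pvStep]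
    rw [hfun, pvGoEq _ hne]
    have hlast : (f0 :: r :: rs).getLast?.getD "" = (r :: rs).getLastD "" := by
      simp [List.getLast?_cons_cons, List.getLastD_eq_getLast?]
    rw [hlast, pvFoldCount]
    simp only [Int.zero_add, Int.ofNat_eq_natCast, Nat.cast_inj]
    apply List.countP_congr
    intro c hc
    rw [Bool.eq_iff_iff]
    have hmemlast : c ∈ ((r :: rs).getLastD "").toList := hc
    have hdecomp : (r :: rs).dropLast ++ [(r :: rs).getLastD ""] = r :: rs := by
      have h1 := List.dropLast_concat_getLast hne
      have h2 : (r :: rs).getLastD "" = (r :: rs).getLast hne := by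
        simp [List.getLastD_eq_getLast?, List.getLast?_eq_some_getLast]
      rw [h2]; exact h1
    have hsplit : ∀ g, g ∈ (f0 :: r :: rs) ↔
        g = f0 ∨ g ∈ (r :: rs).dropLast ∨ g = (r :: rs).getLastD "" := by
      intro g
      constructor
      · intro hg
        rcases List.mem_cons.mp hg with rfl | hg
        · exact Or.inl rfl
        · rw [← hdecomp] at hg
          rcases List.mem_append.mp hg with hg | hg
          · exact Or.inr (Or.inl hg)
          · exact Or.inr (Or.inr (by simpa using hg))
      · rintro (rfl | hg | rfl)
        · exact List.mem_cons_self
        · refine List.mem_cons_of_mem _ ?_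
          rw [← hdecomp]
          exact List.mem_append_left _ hg
        · refine List.mem_cons_of_mem _ ?_
          rw [← hdecomp]
          exact List.mem_append_right _ (by simp)
    rw [pvPresenceGetD, PySem.Dict.getD_empty, Int.zero_add, beq_iff_eq, Nat.cast_inj,
      List.countP_eq_length]
    simp only [Bool.and_eq_true, List.contains_eq_mem, decide_eq_true_eq, iff_true]
    constructor
    · rintro ⟨h0, hall⟩ g hg
      rcases (hsplit g).mp hg with rfl | hg' | hgl
      · exact h0
      · exact hall g hg'
      · rw [hgl]; exact hmemlast
    · intro h
      exact ⟨h f0 ((hsplit f0).mpr (Or.inl rfl)),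
        fun g hg => h g ((hsplit g).mpr (Or.inr (Or.inl hg)))⟩
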